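-- pv_equiv track=rewrite | github.com/cyiafn/cz4031_query_comparer | project.py | groupFormattedSQLByClause
-- ===== SOURCE A (Python) =====
-- from typing import Dict, Any, List, Tuple, Set
--
-- SQL_KEYWORDS = set(
--     "SELECT, FROM, WHERE, GROUP BY, HAVING, ORDER BY, LIMIT, OFFSET, JOIN, INNER JOIN, LEFT JOIN, RIGHT JOIN, FULL JOIN, CROSS JOIN, NATURAL JOIN, USING, DISTINCT, UNION, INTERSECT, EXCEPT, VALUES, FETCH, NEXT, LAST, FIRST, PRIOR, CURRENT, ROW, ROWS, OVER, PARTITION BY, RANK, DENSE_RANK, ROW_NUMBER, LAG, LEAD, FIRST_VALUE, LAST_VALUE, NTH_VALUE, CASE, WHEN, THEN, ELSE, END, CAST, COALESCE, NULLIF, GREATEST, LEAST".split(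
--         ", "
--     )
-- )
--
-- def groupFormattedSQLByClause(sqlQuery: str) -> List[List[str]]:
--     groupedSQL = []
--     tempGroup = []
--     splitSQLQuery = sqlQuery.split("\n")
--     for line in splitSQLQuery:
--         strippedLine = line.strip()
--         if strippedLine.split(" ")[0] in SQL_KEYWORDS:
--             groupedSQL.append(tempGroup) if len(tempGroup) > 0 else None
--             tempGroup = [line]
--         else:
--             tempGroup.append(line)
--
--     groupedSQL.append(tempGroup)
--     return groupedSQL
-- ===== SOURCE B (Python) =====
-- from typing import List
--
-- SQL_KEYWORDS = set(
--     "SELECT, FROM, WHERE, GROUP BY, HAVING, ORDER BY, LIMIT, OFFSET, JOIN, INNER JOIN, LEFT JOIN, RIGHT JOIN, FULL JOIN, CROSS JOIN, NATURAL JOIN, USING, DISTINCT, UNION, INTERSECT, EXCEPT, VALUES, FETCH, NEXT, LAST, FIRST, PRIOR, CURRENT, ROW, ROWS, OVER, PARTITION BY, RANK, DENSE_RANK, ROW_NUMBER, LAG, LEAD, FIRST_VALUE, LAST_VALUE, NTH_VALUE, CASE, WHEN, THEN, ELSE, END, CAST, COALESCE, NULLIF, GREATEST, LEAST".split(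
--         ", "
--     )
-- )
--
-- def _isClauseStart(line: str) -> bool:
--     return line.strip().split(" ")[0] in SQL_KEYWORDS
--
-- def groupFormattedSQLByClause(sqlQuery: str) -> List[List[str]]:
--     lines = sqlQuery.split("\n")
--     cuts = [i for i, line in enumerate(lines) if _isClauseStart(line)]
--     if not cuts:
--         return [lines]
--     out = [lines[:cuts[0]]] if cuts[0] > 0 else []
--     for start, end in zip(cuts, cuts[1:] + [len(lines)]):
--         out.append(lines[start:end])
--     return out
-- ===== Notes on version B (the rewrite author's own statement) =====
-- stated objective: alternative
-- what changed: Replaced A's single-pass running-buffer accumulation with a two-phase shape: first build an index table of clause-boundary line positions, then emit the groups as slices between consecutive boundaries (leading slice only when non-empty, last slice running to the end).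
import Mathlib
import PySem

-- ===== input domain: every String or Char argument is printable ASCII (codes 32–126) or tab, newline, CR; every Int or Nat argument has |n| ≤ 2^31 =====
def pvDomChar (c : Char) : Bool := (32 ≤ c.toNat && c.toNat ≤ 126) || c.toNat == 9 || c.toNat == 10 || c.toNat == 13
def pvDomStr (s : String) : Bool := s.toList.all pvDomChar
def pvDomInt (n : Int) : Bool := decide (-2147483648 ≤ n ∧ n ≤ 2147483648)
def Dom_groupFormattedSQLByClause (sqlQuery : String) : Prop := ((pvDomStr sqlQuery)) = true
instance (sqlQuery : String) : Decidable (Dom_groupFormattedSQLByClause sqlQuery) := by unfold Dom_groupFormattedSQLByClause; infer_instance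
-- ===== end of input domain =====

-- B replaces A's running-buffer accumulation by an index table of clause-boundary positions
-- and slicing between consecutive boundaries (alternative decomposition, same O(n) cost).

-- shared module constant SQL_KEYWORDS (a Python set) and the boundary test
-- `line.strip().split(" ")[0] in SQL_KEYWORDS`, written identically in both sources
def pvSQLKeywords : PySem.Set String := PySem.Set.ofList
  ["SELECT", "FROM", "WHERE", "GROUP BY", "HAVING", "ORDER BY", "LIMIT", "OFFSET", "JOIN",
   "INNER JOIN", "LEFT JOIN", "RIGHT JOIN", "FULL JOIN", "CROSS JOIN", "NATURAL JOIN", "USING",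
   "DISTINCT", "UNION", "INTERSECT", "EXCEPT", "VALUES", "FETCH", "NEXT", "LAST", "FIRST",
   "PRIOR", "CURRENT", "ROW", "ROWS", "OVER", "PARTITION BY", "RANK", "DENSE_RANK", "ROW_NUMBER",
   "LAG", "LEAD", "FIRST_VALUE", "LAST_VALUE", "NTH_VALUE", "CASE", "WHEN", "THEN", "ELSE",
   "END", "CAST", "COALESCE", "NULLIF", "GREATEST", "LEAST"]

-- s.split(sep) for a non-empty literal sep (PySem.Str.split? is none only for sep = "")
def pvSplit (s sep : String) : List String := (PySem.Str.split? s sep).getD []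

-- line.strip().split(" ")[0] in SQL_KEYWORDS  ([0] is the head: a Python split never returns [])
def pvIsClauseStart (line : String) : Bool :=
  PySem.Set.contains pvSQLKeywords ((pvSplit (PySem.Str.strip line) " ").headD "")

-- ===== PORT A =====
def groupFormattedSQLByClause (sqlQuery : String) : List (List String) :=
  let splitSQLQuery := pvSplit sqlQuery "\n"
  let st := splitSQLQuery.foldl
    (fun (st : List (List String) × List String) line =>
      if pvIsClauseStart line then
        ((if st.2.length > 0 then st.1 ++ [st.2] else st.1), [line])
      else
        (st.1, st.2 ++ [line]))
    ([], [])
  st.1 ++ [st.2]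

-- ===== PORT B =====
def groupFormattedSQLByClause_alt (sqlQuery : String) : List (List String) :=
  let lines := pvSplit sqlQuery "\n"
  let cuts := ((PySem.List.enumerate lines 0).filter (fun p => pvIsClauseStart p.2)).map (·.1)
  match cuts with
  | [] => [lines]
  | c0 :: rest =>
    (if 0 < c0 then [PySem.List.slice lines none (some c0)] else []) ++
      (cuts.zip (rest ++ [(lines.length : Int)])).map
        (fun p => PySem.List.slice lines (some p.1) (some p.2))

-- ===== PRECONDITION & SPEC =====
def Spec_groupFormattedSQLByClause (sqlQuery : String) (out : List (List String)) : Prop := out = groupFormattedSQLByClause_alt sqlQuery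
instance (sqlQuery : String) (out : List (List String)) : Decidable (Spec_groupFormattedSQLByClause sqlQuery out) := by unfold Spec_groupFormattedSQLByClause; infer_instance

-- ===== CLAIM (what is proved, stated in full; the proofs are below) =====
def Claim_equal_groupFormattedSQLByClause : Prop := ∀ (sqlQuery : String), Dom_groupFormattedSQLByClause sqlQuery → Spec_groupFormattedSQLByClause sqlQuery (groupFormattedSQLByClause sqlQuery)

-- ===== LEMMAS AND PROOFS =====

-- A's loop as a structural recursion on the remaining lines
def pvARun (temp : List String) : List String → List (List String)
  | [] => [temp]
  | l :: ls =>
    if pvIsClauseStart l then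
      (if temp.length > 0 then [temp] else []) ++ pvARun [l] ls
    else pvARun (temp ++ [l]) ls

-- the boundary positions of the lines, as naturals
def pvCuts : List String → List Nat
  | [] => []
  | l :: ls => (if pvIsClauseStart l then [0] else []) ++ (pvCuts ls).map (· + 1)

def pvNatInt (k : Nat) : Int := k

-- B's slice-between-consecutive-cuts phase, stated over naturals
def pvSegs (lines : List String) : List (List String) :=
  ((pvCuts lines).zip ((pvCuts lines).tail ++ [lines.length])).map
    (fun p => (lines.drop p.1).take (p.2 - p.1))

-- common form: A's run with pending buffer `temp`, expressed by cuts and slices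
def pvMerge (temp : List String) (lines : List String) : List (List String) :=
  match pvCuts lines with
  | [] => [temp ++ lines]
  | c0 :: _ =>
    (if 0 < temp.length + c0 then [temp ++ lines.take c0] else []) ++ pvSegs lines

lemma pvFoldA (ls : List String) : ∀ (g : List (List String)) (temp : List String),
    (ls.foldl (fun (st : List (List String) × List String) line =>
        if pvIsClauseStart line then
          ((if st.2.length > 0 then st.1 ++ [st.2] else st.1), [line])
        else (st.1, st.2 ++ [line])) (g, temp)).1 ++
      [(ls.foldl (fun (st : List (List String) × List String) line =>
        if pvIsClauseStart line then
          ((if st.2.length > 0 then st.1 ++ [st.2] else st.1), [line])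
        else (st.1, st.2 ++ [line])) (g, temp)).2] = g ++ pvARun temp ls := by
  induction ls with
  | nil => intro g temp; simp [pvARun]
  | cons l ls ih =>
    intro g temp
    simp only [List.foldl_cons]
    by_cases h : pvIsClauseStart l
    · simp only [h, if_true, ih, pvARun]
      by_cases ht : temp.length > 0 <;> simp [ht]
    · simp only [h, if_false, ih, pvARun, Bool.false_eq_true]

lemma pvEnumShift {α : Type} (xs : List α) : ∀ (s : Int),
    PySem.List.enumerate xs (s + 1) = (PySem.List.enumerate xs s).map (fun p => (p.1 + 1, p.2)) := by
  induction xs with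
  | nil => intro s; simp [PySem.List.enumerate_nil]
  | cons x xs ih => intro s; simp [PySem.List.enumerate_cons, ih (s + 1)]

-- B's enumerate-and-filter index table is pvCuts, cast to Int
lemma pvCutsEq (lines : List String) :
    ((PySem.List.enumerate lines 0).filter (fun p => pvIsClauseStart p.2)).map (·.1)
      = (pvCuts lines).map pvNatInt := by
  induction lines with
  | nil => simp only [PySem.List.enumerate_nil, List.filter_nil, List.map_nil, pvCuts]
  | cons l ls ih =>
    rw [PySem.List.enumerate_cons, show (0 : Int) + 1 = 0 + 1 by ring, pvEnumShift ls 0]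
    rw [List.filter_cons, List.filter_map]
    have hpred : ((fun p => pvIsClauseStart p.2) ∘ (fun (p : Int × String) => (p.1 + 1, p.2)))
        = (fun p => pvIsClauseStart p.2) := by funext p; simp [Function.comp]
    rw [hpred]
    have hmaps : ((List.filter (fun p => pvIsClauseStart p.2) (PySem.List.enumerate ls 0)).map
          (fun (p : Int × String) => (p.1 + 1, p.2))).map (fun x => x.1)
        = (((List.filter (fun p => pvIsClauseStart p.2) (PySem.List.enumerate ls 0)).map (fun x => x.1)).map (· + 1)) := by
      simp [List.map_map]
    have hcast : ∀ (cs : List Nat), (cs.map (· + 1)).map pvNatInt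
        = (cs.map pvNatInt).map (· + 1) := by
      intro cs; simp only [List.map_map]; apply List.map_congr_left
      intro a _; simp [pvNatInt]
    by_cases h : pvIsClauseStart l <;>
      simp only [pvCuts, h, if_true, if_false, List.cons_append, List.nil_append,
        List.map_cons, hcast, Bool.false_eq_true, hmaps, ih, pvNatInt, Nat.cast_zero]

-- shifting every cut by one and consing a line leaves the slice list unchanged
lemma pvZipShift (l : String) (ls : List String) (cs : List Nat) :
    (((cs.map (· + 1)).zip ((cs.map (· + 1)).tail ++ [ls.length + 1])).map
        (fun p => ((l :: ls).drop p.1).take (p.2 - p.1)))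
      = ((cs.zip (cs.tail ++ [ls.length])).map (fun p => (ls.drop p.1).take (p.2 - p.1))) := by
  have htail : (cs.map (· + 1)).tail ++ [ls.length + 1] = (cs.tail ++ [ls.length]).map (· + 1) := by
    simp [List.map_tail]
  rw [htail, List.zip_map, List.map_map]
  apply List.map_congr_left
  rintro ⟨a, b⟩ _
  simp [Prod.map, Nat.succ_sub_succ]

lemma pvSegs_shift (l : String) (ls : List String) (h : pvIsClauseStart l = false) :
    pvSegs (l :: ls) = pvSegs ls := by
  unfold pvSegs
  have hcuts : pvCuts (l :: ls) = (pvCuts ls).map (· + 1) := by simp [pvCuts, h]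
  rw [hcuts, show (l :: ls).length = ls.length + 1 from rfl]
  exact pvZipShift l ls (pvCuts ls)

lemma pvMerge_cons_true (l : String) (ls : List String) (temp : List String)
    (h : pvIsClauseStart l = true) :
    pvMerge temp (l :: ls) = (if temp.length > 0 then [temp] else []) ++ pvMerge [l] ls := by
  have hcuts : pvCuts (l :: ls) = 0 :: (pvCuts ls).map (· + 1) := by simp [pvCuts, h]
  have hsegs : pvSegs (l :: ls) = pvMerge [l] ls := by
    unfold pvSegs
    rw [hcuts, List.tail_cons]
    cases hc : pvCuts ls with
    | nil => simp [pvMerge, hc]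
    | cons c0 rest =>
      simp only [List.map_cons, List.cons_append, List.zip_cons_cons, List.map_cons,
        show (l :: ls).length = ls.length + 1 from rfl]
      have hrest : (((c0 + 1) :: rest.map (· + 1)).zip ((rest.map (· + 1)) ++ [ls.length + 1])).map
          (fun p => ((l :: ls).drop p.1).take (p.2 - p.1))
          = pvSegs ls := by
        have h2 := pvZipShift l ls (pvCuts ls)
        rw [hc] at h2
        simpa [pvSegs, hc] using h2
      rw [List.drop_zero, Nat.sub_zero, List.take_succ_cons, hrest]
      simp [pvMerge, hc, pvSegs]
  rw [pvMerge, hcuts]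
  simp only [hsegs]
  by_cases ht : temp.length > 0 <;> simp [ht]

lemma pvMerge_cons_false (l : String) (ls : List String) (temp : List String)
    (h : pvIsClauseStart l = false) :
    pvMerge temp (l :: ls) = pvMerge (temp ++ [l]) ls := by
  have hcuts : pvCuts (l :: ls) = (pvCuts ls).map (· + 1) := by simp [pvCuts, h]
  rw [pvMerge, pvMerge, hcuts, pvSegs_shift l ls h]
  cases hc : pvCuts ls with
  | nil => simp
  | cons c0 rest =>
    simp only [List.map_cons]
    rw [if_pos (show 0 < temp.length + (c0 + 1) by omega),
      if_pos (show 0 < (temp ++ [l]).length + c0 by simp)]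
    simp [List.take_succ_cons]

-- main invariant: A's run from buffer `temp` is the cut-and-slice form
lemma pvMain (lines : List String) : ∀ temp, pvARun temp lines = pvMerge temp lines := by
  induction lines with
  | nil => intro temp; simp [pvARun, pvMerge, pvCuts]
  | cons l ls ih =>
    intro temp
    by_cases h : pvIsClauseStart l
    · rw [pvARun, if_pos h, ih [l], pvMerge_cons_true l ls temp h]
    · rw [pvARun, if_neg h, ih (temp ++ [l]), pvMerge_cons_false l ls temp (by simpa using h)]

-- B's port computes pvMerge [] lines
lemma pvAltEq (lines : List String) :
    (match ((PySem.List.enumerate lines 0).filter (fun p => pvIsClauseStart p.2)).map (·.1) with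
      | [] => [lines]
      | c0 :: rest =>
        (if 0 < c0 then [PySem.List.slice lines none (some c0)] else []) ++
          ((((PySem.List.enumerate lines 0).filter (fun p => pvIsClauseStart p.2)).map (·.1)).zip
              (rest ++ [(lines.length : Int)])).map
            (fun p => PySem.List.slice lines (some p.1) (some p.2)))
      = pvMerge [] lines := by
  rw [pvCutsEq]
  cases hc : pvCuts lines with
  | nil => simp [pvMerge, hc]
  | cons c0 rest =>
    simp only [List.map_cons, pvMerge, hc]
    have hrest : (rest.map pvNatInt) ++ [(lines.length : Int)]
        = (rest ++ [lines.length]).map pvNatInt := by simp [pvNatInt]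
    rw [hrest, show (pvNatInt c0 :: rest.map pvNatInt) = ((c0 :: rest).map pvNatInt) from rfl,
      List.zip_map, List.map_map]
    have hzip : ((c0 :: rest).zip ((rest ++ [lines.length]))).map
          ((fun p => PySem.List.slice lines (some p.1) (some p.2)) ∘ Prod.map pvNatInt pvNatInt)
        = pvSegs lines := by
      unfold pvSegs
      rw [hc, List.tail_cons]
      apply List.map_congr_left
      rintro ⟨a, b⟩ _
      simp [Prod.map, pvNatInt, PySem.List.slice_natCast]
    rw [hzip]
    have hlead : (if 0 < pvNatInt c0 then [PySem.List.slice lines none (some (pvNatInt c0))] else [])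
        = (if 0 < List.length ([] : List String) + c0 then [([] : List String) ++ lines.take c0] else []) := by
      by_cases h0 : 0 < c0
      · rw [if_pos (show 0 < pvNatInt c0 by simp [pvNatInt]; omega), if_pos (by simpa using h0)]
        simp [pvNatInt, PySem.List.slice_to_natCast]
      · rw [if_neg (show ¬ 0 < pvNatInt c0 by simp [pvNatInt]; omega), if_neg (by simpa using h0)]
    rw [hlead]

-- ===== VERDICT (by name: the statement is the Claim_ definition above) =====
theorem groupFormattedSQLByClause_spec : Claim_equal_groupFormattedSQLByClause := by
  intro sqlQuery _
  show groupFormattedSQLByClause sqlQuery = groupFormattedSQLByClause_alt sqlQuery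
  unfold groupFormattedSQLByClause groupFormattedSQLByClause_alt
  rw [pvFoldA (pvSplit sqlQuery "\n") [] [], pvMain (pvSplit sqlQuery "\n") [], List.nil_append]
  exact (pvAltEq (pvSplit sqlQuery "\n")).symm
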